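-- pv_equiv track=rewrite | github.com/MatiasBS027/TEC | I SEMESTRE/Introduccion a la Programacion/Tarea5/Retos5.py | diferenciarvalores
-- ===== SOURCE A (Python) =====
-- def diferenciarvalores(pnum):
--     '''
--     Funcionamiento: Encuentra el dígito mayor y menor de un número y calcula la diferencia
--     Entradas: pnum(int): Número a evaluar
--     Salidas: tuple(int,int,int): Dígito mayor, menor y su diferencia
--     '''
--     numMenor = pnum % 10
--     numMayor = pnum % 10
--     while pnum > 0:
--         if pnum % 10 > numMayor:
--             numMayor = pnum % 10
--         if pnum % 10 < numMenor:
--             numMenor = pnum % 10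
--         pnum = pnum // 10
--     diferencia = numMayor - numMenor
--     return numMayor, numMenor, diferencia
-- ===== SOURCE B (Python) =====
-- def diferenciarvalores(pnum):
--     # Different decomposition: collect the digits in a list, sort it,
--     # and read the extremes off the sorted list.
--     digits = [pnum % 10]
--     while pnum > 0:
--         digits.append(pnum % 10)
--         pnum //= 10
--     s = sorted(digits)
--     return s[-1], s[0], s[-1] - s[0]
-- ===== Notes on version B (the rewrite author's own statement) =====
-- stated objective: alternative
-- what changed: Replaces the running max/min comparisons inside the digit loop by collecting the digits into a list and sorting it, reading max and min off the sorted list's ends.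
import Mathlib
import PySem

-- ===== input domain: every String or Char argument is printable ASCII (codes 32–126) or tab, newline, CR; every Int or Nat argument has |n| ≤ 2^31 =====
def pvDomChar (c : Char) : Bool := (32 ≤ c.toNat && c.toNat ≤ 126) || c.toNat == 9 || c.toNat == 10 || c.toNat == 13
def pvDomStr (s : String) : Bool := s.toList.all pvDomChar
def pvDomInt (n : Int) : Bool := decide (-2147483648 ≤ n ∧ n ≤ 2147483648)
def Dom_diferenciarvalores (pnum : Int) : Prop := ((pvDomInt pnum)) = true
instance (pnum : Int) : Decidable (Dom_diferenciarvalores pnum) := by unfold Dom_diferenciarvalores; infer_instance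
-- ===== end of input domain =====

-- B collects the digits into a list and sorts it, instead of A's running max/min loop;
-- same return value on every int (objective: alternative decomposition).

-- ===== PORT A =====
-- the while loop of A, state (pnum, numMayor, numMenor)
def pvLoopA (pnum mayor menor : Int) : Int × Int :=
  if _h : pnum > 0 then
    pvLoopA (PySem.Int.floordiv pnum 10)
      (if PySem.Int.mod pnum 10 > mayor then PySem.Int.mod pnum 10 else mayor)
      (if PySem.Int.mod pnum 10 < menor then PySem.Int.mod pnum 10 else menor)
  else (mayor, menor)
termination_by pnum.toNat
decreasing_by
  have h10 : (0:Int) < 10 := by omega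
  rw [PySem.Int.floordiv_eq_ediv_of_pos h10]
  omega

def diferenciarvalores (pnum : Int) : Int × Int × Int :=
  let numMenor := PySem.Int.mod pnum 10
  let numMayor := PySem.Int.mod pnum 10
  let r := pvLoopA pnum numMayor numMenor
  (r.1, r.2, r.1 - r.2)

-- ===== PORT B =====
-- the while loop of B: digits appended by the loop body (after the initial seed)
def pvDigitsB (pnum : Int) : List Int :=
  if _h : pnum > 0 then PySem.Int.mod pnum 10 :: pvDigitsB (PySem.Int.floordiv pnum 10) else []
termination_by pnum.toNat
decreasing_by
  have h10 : (0:Int) < 10 := by omega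
  rw [PySem.Int.floordiv_eq_ediv_of_pos h10]
  omega

def diferenciarvalores_alt (pnum : Int) : Int × Int × Int :=
  let digits := PySem.Int.mod pnum 10 :: pvDigitsB pnum
  let s := PySem.List.sorted digits (fun x => x) false
  let mx := (PySem.List.pyGet? s (-1)).getD 0   -- s[-1]; s is nonempty, getD 0 is a totality default
  let mn := (PySem.List.pyGet? s 0).getD 0      -- s[0]
  (mx, mn, mx - mn)

-- ===== PRECONDITION & SPEC =====
def Spec_diferenciarvalores (pnum : Int) (out : Int × Int × Int) : Prop := out = diferenciarvalores_alt pnum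
instance (pnum : Int) (out : Int × Int × Int) : Decidable (Spec_diferenciarvalores pnum out) := by unfold Spec_diferenciarvalores; infer_instance

-- ===== CLAIM (what is proved, stated in full; the proofs are below) =====
def Claim_equal_diferenciarvalores : Prop := ∀ (pnum : Int), Dom_diferenciarvalores pnum → Spec_diferenciarvalores pnum (diferenciarvalores pnum)

-- ===== LEMMAS AND PROOFS =====

-- A's loop computes the running max/min of the digit list B collects
lemma pvLoopA_eq (pnum mayor menor : Int) :
    pvLoopA pnum mayor menor = ((pvDigitsB pnum).foldl max mayor, (pvDigitsB pnum).foldl min menor) := by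
  fun_induction pvLoopA pnum mayor menor with
  | case1 pnum mayor menor h ih =>
      rw [pvDigitsB, dif_pos h, List.foldl_cons, List.foldl_cons]
      refine ih.trans ?_
      congr 1
      · congr 1; split_ifs <;> omega
      · congr 1; split_ifs <;> omega
  | case2 pnum mayor menor h =>
      rw [pvDigitsB, dif_neg h]; simp

-- head and last of the sorted digit list are the fold-min and fold-max
lemma sorted_head_last (d0 : Int) (ds : List Int) :
    PySem.List.pyGet? (PySem.List.sorted (d0 :: ds) (fun x => x) false) 0
        = some (ds.foldl min d0) ∧
    PySem.List.pyGet? (PySem.List.sorted (d0 :: ds) (fun x => x) false) (-1)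
        = some (ds.foldl max d0) := by
  set s := PySem.List.sorted (d0 :: ds) (fun x => x) false with hsdef
  have hne : s ≠ [] := by
    simp [hsdef, PySem.List.sorted_eq_nil_iff]
  obtain ⟨m, t, hs⟩ := List.exists_cons_of_ne_nil hne
  have hmin := PySem.List.min?_id_cons d0 ds
  have hmax := PySem.List.max?_id_cons d0 ds
  have hvmin_mem : ds.foldl min d0 ∈ d0 :: ds := PySem.List.min?_mem hmin
  have hvmax_mem : ds.foldl max d0 ∈ d0 :: ds := PySem.List.max?_mem hmax
  have hvmin_le : ∀ y ∈ d0 :: ds, ds.foldl min d0 ≤ y := PySem.List.min?_isMin hmin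
  have hvmax_ge : ∀ y ∈ d0 :: ds, y ≤ ds.foldl max d0 := PySem.List.max?_isMax hmax
  constructor
  · -- head
    have hm_le : ∀ y ∈ d0 :: ds, m ≤ y := PySem.List.key_head_sorted_le _ _ (hsdef ▸ hs)
    have hm_mem : m ∈ d0 :: ds := by
      rw [← PySem.List.mem_sorted (d0 :: ds) (fun x => x) false, ← hsdef, hs]
      exact List.mem_cons_self
    have : m = ds.foldl min d0 := le_antisymm (hm_le _ hvmin_mem) (hvmin_le _ hm_mem)
    rw [hs]
    simp [PySem.List.pyGet?, PySem.List.pyIdx?, this]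
  · -- last
    have hlen : s.length = ds.length + 1 := by
      rw [hsdef, PySem.List.length_sorted]; simp
    have hlt : s.length - 1 < s.length := by omega
    have hL_mem : s[s.length - 1] ∈ d0 :: ds := by
      rw [← PySem.List.mem_sorted (d0 :: ds) (fun x => x) false, ← hsdef]
      exact List.getElem_mem _
    obtain ⟨q, hq, hqV⟩ := List.getElem_of_mem
      ((PySem.List.mem_sorted (d0 :: ds) (fun x => x) false _).2 hvmax_mem)
    simp only [← hsdef] at hq hqV
    have hmono := PySem.List.sorted_id_getElem_mono (d0 :: ds) (p := q) (q := s.length - 1)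
      (by omega) (by rw [← hsdef]; omega)
    simp only [← hsdef] at hmono
    have hLV : s[s.length - 1] = ds.foldl max d0 := by
      have h1 : s[s.length - 1] ≤ ds.foldl max d0 := hvmax_ge _ hL_mem
      have h2 : ds.foldl max d0 ≤ s[s.length - 1] := by
        calc ds.foldl max d0 = s[q] := hqV.symm
          _ ≤ s[s.length - 1] := hmono
      omega
    have hidx : PySem.List.pyIdx? s.length (-1) = some (s.length - 1) := by
      simp [PySem.List.pyIdx?]; omega
    simp [PySem.List.pyGet?, hidx, List.getElem?_eq_getElem hlt, hLV]

-- ===== VERDICT (by name: the statement is the Claim_ definition above) =====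
theorem diferenciarvalores_spec : Claim_equal_diferenciarvalores := by
  intro pnum _
  unfold Spec_diferenciarvalores diferenciarvalores diferenciarvalores_alt
  obtain ⟨h0, h1⟩ := sorted_head_last (PySem.Int.mod pnum 10) (pvDigitsB pnum)
  simp only [pvLoopA_eq, h0, h1]
  rfl
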